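-- pv_equiv track=rewrite | github.com/Amd36/exoskeleton | Inverse Dynamics/run_inverse_dynamics.py | abbreviate_motion_id
-- ===== SOURCE A (Python) =====
-- def abbreviate_motion_id(motion_id: str) -> str:
--     tokens = [token for token in motion_id.split("_") if token]
--     parts: list[str] = []
--     index = 0
--
--     while index < len(tokens):
--         token = tokens[index]
--         letters = "".join(char for char in token if char.isalpha())
--         digits = "".join(char for char in token if char.isdigit())
--
--         if letters:
--             part = letters[0].upper()
--             if digits:
--                 part += digits
--             elif index + 1 < len(tokens) and tokens[index + 1].isdigit():
--                 part += tokens[index + 1]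
--                 index += 1
--             parts.append(part)
--         elif digits:
--             parts.append(digits)
--
--         index += 1
--
--     abbreviation = "".join(parts)
--     if abbreviation == "":
--         raise ValueError(f"Could not infer a session id from motion file name: {motion_id}")
--     return abbreviation
-- ===== SOURCE B (Python) =====
-- def abbreviate_motion_id(motion_id: str) -> str:
--     def contrib(token: str) -> str:
--         letters = [char for char in token if char.isalpha()]
--         digits = "".join(char for char in token if char.isdigit())
--         return letters[0].upper() + digits if letters else digits
--
--     abbreviation = "".join(contrib(token) for token in motion_id.split("_"))
--     if abbreviation == "":
--         raise ValueError(f"Could not infer a session id from motion file name: {motion_id}")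
--     return abbreviation
-- ===== Notes on version B (the rewrite author's own statement) =====
-- stated objective: simpler
-- what changed: B drops A's index-driven while loop with one-token digit lookahead/absorption and instead maps each token to its contribution (first letter uppercased plus its digits, or just its digits) and joins, relying on the fact that absorption only moves part boundaries, which the final join erases.
import Mathlib
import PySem

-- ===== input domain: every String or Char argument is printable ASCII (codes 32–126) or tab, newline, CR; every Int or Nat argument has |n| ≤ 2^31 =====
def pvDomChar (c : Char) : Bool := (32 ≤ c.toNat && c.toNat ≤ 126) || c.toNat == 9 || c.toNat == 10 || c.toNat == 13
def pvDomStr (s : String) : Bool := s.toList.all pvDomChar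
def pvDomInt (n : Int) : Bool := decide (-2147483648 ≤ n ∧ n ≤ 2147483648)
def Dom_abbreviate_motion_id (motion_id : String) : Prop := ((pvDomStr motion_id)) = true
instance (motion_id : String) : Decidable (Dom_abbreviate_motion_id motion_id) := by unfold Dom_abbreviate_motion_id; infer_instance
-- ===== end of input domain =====

-- B replaces A's index-driven while loop with digit-token lookahead/absorption by a plain
-- map-and-join over the split tokens (objective: simpler — absorption only moves part
-- boundaries, which the final join erases).


-- ===== PORT A =====
-- A's while loop over `tokens` with manual `index` (which may advance by 2 when a
-- pure-digit token is absorbed), as the obvious structural recursion on the token list.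
-- (letters/digits are bound once in Python; here the two filters are written inline,
-- same values.)
def pvA_loop : List (List Char) → List (List Char)
  | [] => []
  | t :: rest =>
    match t.filter PySem.Chars.isalpha with
    | l0 :: _ =>
      if t.filter PySem.Chars.isdigit = [] then
        match rest with
        | r :: rest' =>
          if PySem.Chars.strIsdigit r then (PySem.Chars.upperChar l0 :: r) :: pvA_loop rest'
          else [PySem.Chars.upperChar l0] :: pvA_loop (r :: rest')
        | [] => [PySem.Chars.upperChar l0] :: pvA_loop []
      else (PySem.Chars.upperChar l0 :: t.filter PySem.Chars.isdigit) :: pvA_loop rest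
    | [] =>
      if t.filter PySem.Chars.isdigit = [] then pvA_loop rest
      else (t.filter PySem.Chars.isdigit) :: pvA_loop rest
  termination_by ts => ts.length
  decreasing_by all_goals (simp; try omega)

-- On inputs where A raises ValueError (empty abbreviation) this port returns "";
-- those inputs are excluded by Pre_abbreviate_motion_id below.
def abbreviate_motion_id (motion_id : String) : String :=
  let tokens := (PySem.Chars.splitOn motion_id.toList ['_']).filter (fun t => t ≠ [])
  let parts := pvA_loop tokens
  String.ofList (PySem.Chars.join [] parts)

-- ===== PORT B =====
def pvB_contrib (token : List Char) : List Char :=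
  let letters := token.filter PySem.Chars.isalpha
  let digits := token.filter PySem.Chars.isdigit
  match letters with
  | l0 :: _ => PySem.Chars.upperChar l0 :: digits
  | [] => digits

def abbreviate_motion_id_alt (motion_id : String) : String :=
  String.ofList (PySem.Chars.join []
    ((PySem.Chars.splitOn motion_id.toList ['_']).map pvB_contrib))

-- ===== PRECONDITION & SPEC =====
-- Pre_ excludes exactly the inputs with no alphanumeric character, on which A raises
-- ValueError; B raises the same ValueError there.
def Pre_abbreviate_motion_id (motion_id : String) : Prop :=
  motion_id.toList.any (fun c => PySem.Chars.isalpha c || PySem.Chars.isdigit c) = true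
instance (motion_id : String) : Decidable (Pre_abbreviate_motion_id motion_id) := by
  unfold Pre_abbreviate_motion_id; infer_instance
def pvWitness_abbreviate_motion_id : String := "walk_01"

def Spec_abbreviate_motion_id (motion_id : String) (out : String) : Prop := out = abbreviate_motion_id_alt motion_id
instance (motion_id : String) (out : String) : Decidable (Spec_abbreviate_motion_id motion_id out) := by unfold Spec_abbreviate_motion_id; infer_instance

-- ===== CLAIM (what is proved, stated in full; the proofs are below) =====
def Claim_equal_abbreviate_motion_id : Prop := ∀ (motion_id : String), Dom_abbreviate_motion_id motion_id → Pre_abbreviate_motion_id motion_id → Spec_abbreviate_motion_id motion_id (abbreviate_motion_id motion_id)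

-- ===== LEMMAS AND PROOFS =====

lemma pv_join_nil_eq_flatten (parts : List (List Char)) :
    PySem.Chars.join [] parts = parts.flatten := by
  induction parts with
  | nil => simp [PySem.Chars.join, List.intercalate]
  | cons p ps ih =>
    cases ps with
    | nil => simp [PySem.Chars.join, List.intercalate]
    | cons q qs =>
      rw [PySem.Chars.join_cons_cons, ih]
      simp

lemma pv_isalpha_of_isdigit (c : Char) (h : PySem.Chars.isdigit c = true) :
    PySem.Chars.isalpha c = false := by
  simp [PySem.Chars.isdigit] at h
  simp [PySem.Chars.isalpha, PySem.Chars.isupper, PySem.Chars.islower]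
  constructor <;> intro hle <;>
    [exact absurd (le_trans hle h.2) (by decide); exact absurd (le_trans hle h.2) (by decide)]

-- a pure-digit token contributes itself in B
lemma pv_contrib_of_strIsdigit (r : List Char) (h : PySem.Chars.strIsdigit r = true) :
    pvB_contrib r = r := by
  simp [PySem.Chars.strIsdigit, List.all_eq_true] at h
  have hfa : r.filter PySem.Chars.isalpha = [] := by
    simp [List.filter_eq_nil_iff]
    intro c hc
    simp [pv_isalpha_of_isdigit c (h.2 c hc)]
  have hfd : r.filter PySem.Chars.isdigit = r :=
    List.filter_eq_self.mpr h.2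
  simp [pvB_contrib, hfa, hfd]

-- the main loop lemma: flattened, A's loop equals B's map
lemma pv_loop_eq_map (ts : List (List Char)) :
    (pvA_loop ts).flatten = (ts.map pvB_contrib).flatten := by
  induction ts using pvA_loop.induct with
  | case1 => rw [pvA_loop]; rfl
  | case2 t l0 tail hl hd r rest' hr ih =>
    simp only [List.unattach_filter, List.unattach_attach] at hl hd
    rw [pvA_loop, hl]
    dsimp only
    rw [if_pos hd, if_pos hr]
    simp only [List.map_cons, List.flatten_cons, ih, pv_contrib_of_strIsdigit r hr]
    simp [pvB_contrib, hl, hd]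
  | case3 t l0 tail hl hd r rest' hr ih =>
    simp only [List.unattach_filter, List.unattach_attach] at hl hd
    rw [pvA_loop, hl]
    dsimp only
    rw [if_pos hd, if_neg hr]
    simp [pvB_contrib, hl, hd, ih]
  | case4 t l0 tail hl hd =>
    simp only [List.unattach_filter, List.unattach_attach] at hl hd
    rw [pvA_loop, hl]
    dsimp only
    rw [if_pos hd]
    simp [pvB_contrib, hl, hd, pvA_loop]
  | case5 t rest l0 tail hl hd ih =>
    simp only [List.unattach_filter, List.unattach_attach] at hl hd
    rw [pvA_loop, hl]
    dsimp only
    rw [if_neg hd]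
    simp [pvB_contrib, hl, ih]
  | case6 t rest hl hd ih =>
    simp only [List.unattach_filter, List.unattach_attach] at hl hd
    rw [pvA_loop, hl]
    dsimp only
    rw [if_pos hd]
    simp [pvB_contrib, hl, hd, ih]
  | case7 t rest hl hd ih =>
    simp only [List.unattach_filter, List.unattach_attach] at hl hd
    rw [pvA_loop, hl]
    dsimp only
    rw [if_neg hd]
    simp [pvB_contrib, hl, ih]

-- dropping empty tokens does not change B's map-and-join
lemma pv_filter_nonempty (ts : List (List Char)) :
    ((ts.filter (fun t => t ≠ [])).map pvB_contrib).flatten = (ts.map pvB_contrib).flatten := by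
  induction ts with
  | nil => rfl
  | cons t rest ih =>
    by_cases h : t = []
    · subst h
      rw [List.filter_cons, if_neg (by simp), List.map_cons, List.flatten_cons, ih]
      simp [pvB_contrib]
    · rw [List.filter_cons, if_pos (by simp [h]), List.map_cons, List.flatten_cons, ih,
        List.map_cons, List.flatten_cons]

-- ===== VERDICT (by name: the statement is the Claim_ definition above) =====
theorem abbreviate_motion_id_spec : Claim_equal_abbreviate_motion_id := by
  intro motion_id _ _
  simp only [Spec_abbreviate_motion_id, abbreviate_motion_id, abbreviate_motion_id_alt,
    pv_join_nil_eq_flatten, pv_loop_eq_map, pv_filter_nonempty]
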